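-- pv_equiv track=rewrite | github.com/grimmsgadgets-cmyk/actortracker | priority_questions.py | phase_label_for_question
-- ===== SOURCE A (Python) =====
-- def question_category_hints(question_text: str) -> set[str]:
--     lowered = question_text.lower()
--     hints: set[str] = set()
--     if any(token in lowered for token in ('phish', 'email', 'exploit', 'vpn', 'edge', 'initial access')):
--         hints.add('initial_access')
--     if any(token in lowered for token in ('powershell', 'wmi', 'execution', 'command line')):
--         hints.add('execution')
--     if any(token in lowered for token in ('scheduled task', 'startup', 'persistence')):
--         hints.add('persistence')
--     if any(token in lowered for token in ('lateral', 'rdp', 'smb')):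
--         hints.add('lateral_movement')
--     if any(token in lowered for token in ('dns', 'domain', 'c2', 'beacon', 'command-and-control')):
--         hints.add('command_and_control')
--     if any(token in lowered for token in ('exfiltrat', 'stolen data', 'collection')):
--         hints.add('exfiltration')
--     if any(token in lowered for token in ('encrypt', 'ransom', 'impact', 'disrupt')):
--         hints.add('impact')
--     return hints
--
-- def phase_label_for_question(question_text: str) -> str:
--     hints = question_category_hints(question_text)
--     ordered = [
--         ('initial_access', 'Initial Access'),
--         ('execution', 'Execution'),
--         ('persistence', 'Persistence'),
--         ('lateral_movement', 'Lateral Movement'),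
--         ('command_and_control', 'Command and Control'),
--         ('exfiltration', 'Exfiltration'),
--         ('impact', 'Impact'),
--     ]
--     for key, label in ordered:
--         if key in hints:
--             return label
--     return 'General'
-- ===== SOURCE B (Python) =====
-- _PHASE_TABLE = [
--     ('Initial Access', ('phish', 'email', 'exploit', 'vpn', 'edge', 'initial access')),
--     ('Execution', ('powershell', 'wmi', 'execution', 'command line')),
--     ('Persistence', ('scheduled task', 'startup', 'persistence')),
--     ('Lateral Movement', ('lateral', 'rdp', 'smb')),
--     ('Command and Control', ('dns', 'domain', 'c2', 'beacon', 'command-and-control')),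
--     ('Exfiltration', ('exfiltrat', 'stolen data', 'collection')),
--     ('Impact', ('encrypt', 'ransom', 'impact', 'disrupt')),
-- ]
--
-- def phase_label_for_question(question_text: str) -> str:
--     lowered = question_text.lower()
--     for label, tokens in _PHASE_TABLE:
--         if any(token in lowered for token in tokens):
--             return label
--     return 'General'
-- ===== Notes on version B (the rewrite author's own statement) =====
-- stated objective: simpler
-- what changed: Replaces the two-phase design (build a hint set with seven any()-checks, then scan an ordered key list against the set) with a single pass over one priority-ordered (label, tokens) table that returns the first matching label directly, dropping the intermediate set and second scan.
import Mathlib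
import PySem

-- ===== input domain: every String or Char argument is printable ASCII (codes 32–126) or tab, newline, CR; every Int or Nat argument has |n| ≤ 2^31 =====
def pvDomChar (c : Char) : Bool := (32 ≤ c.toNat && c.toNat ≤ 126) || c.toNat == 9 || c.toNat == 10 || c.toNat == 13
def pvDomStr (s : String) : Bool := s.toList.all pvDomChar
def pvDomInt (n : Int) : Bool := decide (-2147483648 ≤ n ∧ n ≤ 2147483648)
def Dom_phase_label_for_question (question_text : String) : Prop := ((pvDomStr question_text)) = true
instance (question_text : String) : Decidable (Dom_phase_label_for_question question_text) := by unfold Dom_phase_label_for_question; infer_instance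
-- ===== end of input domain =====

-- B replaces A's two-phase design (hint set then ordered scan) with one pass over a priority-ordered table; objective: simpler.

-- ===== PORT A =====
def question_category_hints (question_text : String) : PySem.Set String :=
  let lowered := PySem.Str.lower question_text
  let hints : PySem.Set String := PySem.Set.empty
  let hints := if ["phish", "email", "exploit", "vpn", "edge", "initial access"].any
      (fun token => PySem.Str.isIn token lowered) then hints.add "initial_access" else hints
  let hints := if ["powershell", "wmi", "execution", "command line"].any
      (fun token => PySem.Str.isIn token lowered) then hints.add "execution" else hints
  let hints := if ["scheduled task", "startup", "persistence"].any
      (fun token => PySem.Str.isIn token lowered) then hints.add "persistence" else hints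
  let hints := if ["lateral", "rdp", "smb"].any
      (fun token => PySem.Str.isIn token lowered) then hints.add "lateral_movement" else hints
  let hints := if ["dns", "domain", "c2", "beacon", "command-and-control"].any
      (fun token => PySem.Str.isIn token lowered) then hints.add "command_and_control" else hints
  let hints := if ["exfiltrat", "stolen data", "collection"].any
      (fun token => PySem.Str.isIn token lowered) then hints.add "exfiltration" else hints
  let hints := if ["encrypt", "ransom", "impact", "disrupt"].any
      (fun token => PySem.Str.isIn token lowered) then hints.add "impact" else hints
  hints

-- the 'for key, label in ordered: if key in hints: return label' loop
def pvOrderedScan (hints : PySem.Set String) : List (String × String) → String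
  | [] => "General"
  | (key, label) :: rest =>
      if PySem.Set.contains hints key then label else pvOrderedScan hints rest

def phase_label_for_question (question_text : String) : String :=
  let hints := question_category_hints question_text
  let ordered : List (String × String) :=
    [("initial_access", "Initial Access"),
     ("execution", "Execution"),
     ("persistence", "Persistence"),
     ("lateral_movement", "Lateral Movement"),
     ("command_and_control", "Command and Control"),
     ("exfiltration", "Exfiltration"),
     ("impact", "Impact")]
  pvOrderedScan hints ordered

-- ===== PORT B =====
def pvPhaseTable : List (String × List String) :=
  [("Initial Access", ["phish", "email", "exploit", "vpn", "edge", "initial access"]),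
   ("Execution", ["powershell", "wmi", "execution", "command line"]),
   ("Persistence", ["scheduled task", "startup", "persistence"]),
   ("Lateral Movement", ["lateral", "rdp", "smb"]),
   ("Command and Control", ["dns", "domain", "c2", "beacon", "command-and-control"]),
   ("Exfiltration", ["exfiltrat", "stolen data", "collection"]),
   ("Impact", ["encrypt", "ransom", "impact", "disrupt"])]

def pvTableScan (lowered : String) : List (String × List String) → String
  | [] => "General"
  | (label, tokens) :: rest =>
      if tokens.any (fun token => PySem.Str.isIn token lowered) then label
      else pvTableScan lowered rest

def phase_label_for_question_alt (question_text : String) : String :=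
  pvTableScan (PySem.Str.lower question_text) pvPhaseTable

-- ===== PRECONDITION & SPEC =====
def Spec_phase_label_for_question (question_text : String) (out : String) : Prop := out = phase_label_for_question_alt question_text
instance (question_text : String) (out : String) : Decidable (Spec_phase_label_for_question question_text out) := by unfold Spec_phase_label_for_question; infer_instance

-- ===== CLAIM (what is proved, stated in full; the proofs are below) =====
def Claim_equal_phase_label_for_question : Prop := ∀ (question_text : String), Dom_phase_label_for_question question_text → Spec_phase_label_for_question question_text (phase_label_for_question question_text)

-- ===== LEMMAS AND PROOFS =====

-- ===== VERDICT (by name: the statement is the Claim_ definition above) =====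
set_option maxHeartbeats 1600000 in
theorem phase_label_for_question_spec : Claim_equal_phase_label_for_question := by
  intro q _
  unfold Spec_phase_label_for_question phase_label_for_question phase_label_for_question_alt
    question_category_hints pvPhaseTable
  simp only [pvTableScan]
  generalize (["phish", "email", "exploit", "vpn", "edge", "initial access"].any
      (fun token => PySem.Str.isIn token (PySem.Str.lower q))) = c1
  generalize (["powershell", "wmi", "execution", "command line"].any
      (fun token => PySem.Str.isIn token (PySem.Str.lower q))) = c2
  generalize (["scheduled task", "startup", "persistence"].any
      (fun token => PySem.Str.isIn token (PySem.Str.lower q))) = c3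
  generalize (["lateral", "rdp", "smb"].any
      (fun token => PySem.Str.isIn token (PySem.Str.lower q))) = c4
  generalize (["dns", "domain", "c2", "beacon", "command-and-control"].any
      (fun token => PySem.Str.isIn token (PySem.Str.lower q))) = c5
  generalize (["exfiltrat", "stolen data", "collection"].any
      (fun token => PySem.Str.isIn token (PySem.Str.lower q))) = c6
  generalize (["encrypt", "ransom", "impact", "disrupt"].any
      (fun token => PySem.Str.isIn token (PySem.Str.lower q))) = c7
  cases c1 <;> cases c2 <;> cases c3 <;> cases c4 <;> cases c5 <;> cases c6 <;> cases c7 <;> decide
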